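-- pv_equiv track=rewrite | github.com/syntra-vindevoy/python-1-2024 | oefeningen/5_chars/old.py | get_5_char_combination_set
-- ===== SOURCE A (Python) =====
-- def get_5_char_combination_set(character_stringlist):
--     character_combinations = set()
--     length = len(character_stringlist)
--     for i in range(0,length):
--         char_1 = character_stringlist[i]
--         for j in range (i+1,length):
--             char_2 = character_stringlist[j]
--             for k in range (j+1,length):
--                 char_3 = character_stringlist[k]
--                 for l in range (k+1,length):
--                     char_4 = character_stringlist[l]
--                     for m in range (l+1,length):
--                         char_5 = character_stringlist[m]
--                         character_combinations.add(''.join([char_1,char_2,char_3,char_4,char_5]))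
--     return character_combinations
-- ===== SOURCE B (Python) =====
-- def get_5_char_combination_set(character_stringlist):
--     character_combinations = set()
--
--     def choose(rest, picked):
--         if len(picked) == 5:
--             character_combinations.add(''.join(picked))
--         elif len(picked) + len(rest) >= 5:
--             choose(rest[1:], picked + [rest[0]])
--             choose(rest[1:], picked)
--
--     choose(character_stringlist, [])
--     return character_combinations
-- ===== Notes on version B (the rewrite author's own statement) =====
-- stated objective: alternative
-- what changed: Replaces the five fixed nested index loops with a single take/skip recursion over list suffixes that accumulates picked elements (pruned when too few elements remain to complete a 5-combination), emitting the joined string when five are picked.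
import Mathlib
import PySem

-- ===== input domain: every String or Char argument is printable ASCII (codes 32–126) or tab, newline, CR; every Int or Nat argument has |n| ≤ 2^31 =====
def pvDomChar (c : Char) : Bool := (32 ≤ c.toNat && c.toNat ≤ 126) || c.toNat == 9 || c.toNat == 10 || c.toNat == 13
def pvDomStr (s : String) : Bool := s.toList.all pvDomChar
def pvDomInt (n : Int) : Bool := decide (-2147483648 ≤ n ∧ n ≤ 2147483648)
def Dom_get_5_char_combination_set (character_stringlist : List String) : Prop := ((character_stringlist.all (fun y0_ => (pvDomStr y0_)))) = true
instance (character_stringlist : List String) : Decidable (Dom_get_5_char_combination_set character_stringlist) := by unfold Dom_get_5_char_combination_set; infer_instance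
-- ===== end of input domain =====

-- B replaces A's five fixed nested index loops by one take/skip recursion over list
-- suffixes (pruned when too few elements remain); same 5-combination set, same insertion order.

-- ===== PORT A =====
def get_5_char_combination_set (character_stringlist : List String) : List String :=
  let character_combinations : PySem.Set String := PySem.Set.empty
  let length : Int := PySem.List.len character_stringlist
  (PySem.List.pyRange 0 length).foldl (fun acc i =>
    let char_1 := PySem.List.pyGetD character_stringlist i ""
    (PySem.List.pyRange (i+1) length).foldl (fun acc j =>
      let char_2 := PySem.List.pyGetD character_stringlist j ""
      (PySem.List.pyRange (j+1) length).foldl (fun acc k =>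
        let char_3 := PySem.List.pyGetD character_stringlist k ""
        (PySem.List.pyRange (k+1) length).foldl (fun acc l =>
          let char_4 := PySem.List.pyGetD character_stringlist l ""
          (PySem.List.pyRange (l+1) length).foldl (fun acc m =>
            let char_5 := PySem.List.pyGetD character_stringlist m ""
            PySem.Set.add acc (PySem.Str.join "" [char_1, char_2, char_3, char_4, char_5]))
            acc) acc) acc) acc) character_combinations

-- ===== PORT B =====
-- take/skip recursion of Source B's `choose`; the `[]` arm is unreachable (when picked.length < 5
-- and 5 ≤ picked.length + rest.length, rest is nonempty), matching Python's rest[0]/rest[1:].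
def pvChoose (rest : List String) (picked : List String) (acc : PySem.Set String) : PySem.Set String :=
  if picked.length = 5 then PySem.Set.add acc (PySem.Str.join "" picked)
  else if 5 ≤ picked.length + rest.length then
    match rest with
    | [] => acc
    | h :: t => pvChoose t picked (pvChoose t (picked ++ [h]) acc)
  else acc
termination_by rest.length

def get_5_char_combination_set_alt (character_stringlist : List String) : List String :=
  pvChoose character_stringlist [] PySem.Set.empty

-- ===== PRECONDITION & SPEC =====
def Spec_get_5_char_combination_set (character_stringlist : List String) (out : List String) : Prop := out = get_5_char_combination_set_alt character_stringlist
instance (character_stringlist : List String) (out : List String) : Decidable (Spec_get_5_char_combination_set character_stringlist out) := by unfold Spec_get_5_char_combination_set; infer_instance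

-- ===== CLAIM (what is proved, stated in full; the proofs are below) =====
def Claim_equal_get_5_char_combination_set : Prop := ∀ (character_stringlist : List String), Dom_get_5_char_combination_set character_stringlist → Spec_get_5_char_combination_set character_stringlist (get_5_char_combination_set character_stringlist)

-- ===== LEMMAS AND PROOFS =====

-- pvChoose without the pruning shortcut (proof helper only)
def pvGo (rest : List String) (picked : List String) (acc : PySem.Set String) : PySem.Set String :=
  if picked.length = 5 then PySem.Set.add acc (PySem.Str.join "" picked)
  else match rest with
  | [] => acc
  | h :: t => pvGo t picked (pvGo t (picked ++ [h]) acc)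
termination_by rest.length

theorem pvGo_dead (rest : List String) : ∀ (picked : List String) (acc : PySem.Set String),
    picked.length + rest.length < 5 → pvGo rest picked acc = acc := by
  induction rest with
  | nil =>
    intro picked acc h
    unfold pvGo
    rw [if_neg (by simp at h ⊢; omega)]
  | cons x t ih =>
    intro picked acc h
    unfold pvGo
    rw [if_neg (by simp at h ⊢; omega)]
    show pvGo t picked (pvGo t (picked ++ [x]) acc) = acc
    rw [ih (picked ++ [x]) acc (by simp at h ⊢; omega), ih picked acc (by simp at h ⊢; omega)]

theorem pvChoose_eq_pvGo (rest : List String) : ∀ (picked : List String) (acc : PySem.Set String),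
    pvChoose rest picked acc = pvGo rest picked acc := by
  induction rest with
  | nil =>
    intro picked acc
    unfold pvChoose pvGo
    by_cases h5 : picked.length = 5
    · rw [if_pos h5, if_pos h5]
    · rw [if_neg h5, if_neg h5]
      split <;> rfl
  | cons x t ih =>
    intro picked acc
    unfold pvChoose pvGo
    by_cases h5 : picked.length = 5
    · rw [if_pos h5, if_pos h5]
    · rw [if_neg h5, if_neg h5]
      by_cases hp : 5 ≤ picked.length + (x :: t).length
      · rw [if_pos hp]
        show pvChoose t picked (pvChoose t (picked ++ [x]) acc)
          = pvGo t picked (pvGo t (picked ++ [x]) acc)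
        rw [ih, ih]
      · rw [if_neg hp]
        show acc = pvGo t picked (pvGo t (picked ++ [x]) acc)
        rw [pvGo_dead t (picked ++ [x]) acc (by simp at hp ⊢; omega),
            pvGo_dead t picked acc (by simp at hp ⊢; omega)]

-- fold of g over the suffix after each element, in order (proof helper)
def pvSufFold (g : String → List String → PySem.Set String → PySem.Set String) :
    List String → PySem.Set String → PySem.Set String
  | [], acc => acc
  | h :: t, acc => pvSufFold g t (g h t acc)

theorem pvSufFold_congr (g g' : String → List String → PySem.Set String → PySem.Set String)
    (h : ∀ c suf a, g c suf a = g' c suf a) :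
    ∀ (xs : List String) (acc : PySem.Set String), pvSufFold g xs acc = pvSufFold g' xs acc := by
  intro xs
  induction xs with
  | nil => intro acc; rfl
  | cons x t ih => intro acc; simp only [pvSufFold, h, ih]

-- an index loop 'for j in range(i, len(l)): … l[j] …, range(j+1, …)' is a suffix fold
theorem pvRange_foldl_suffix (l : List String)
    (g : String → List String → PySem.Set String → PySem.Set String) :
    ∀ (xs : List String) (i : Int), 0 ≤ i → List.drop i.toNat l = xs → ∀ acc,
    List.foldl (fun acc j => g (PySem.List.pyGetD l j "") (List.drop (j+1).toNat l) acc) acc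
      (PySem.List.pyRange i (PySem.List.len l))
    = pvSufFold g xs acc := by
  intro xs
  induction xs with
  | nil =>
    intro i hi hd acc
    have hlen : l.length ≤ i.toNat := by
      by_contra hc
      have := List.length_drop (l := l) (i := i.toNat)
      rw [hd] at this
      simp at this
      omega
    rw [PySem.List.pyRange_one_eq_nil (by rw [PySem.List.len_eq]; omega)]
    rfl
  | cons x t ih =>
    intro i hi hd acc
    have hlt : i.toNat < l.length := by
      by_contra hc
      rw [List.drop_eq_nil_of_le (by omega)] at hd
      simp at hd
    have hx : l[i.toNat]? = some x := by
      have h0 : (List.drop i.toNat l)[0]? = some x := by rw [hd]; rfl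
      rw [List.getElem?_drop] at h0
      simpa using h0
    rw [PySem.List.pyRange_one_cons (by rw [PySem.List.len_eq]; omega)]
    rw [List.foldl_cons]
    have hget : PySem.List.pyGetD l i "" = x := by
      rw [PySem.List.pyGetD_of_nonneg l "" hi, List.getD_eq_getElem?_getD, hx]
      rfl
    have ht : List.drop (i+1).toNat l = t := by
      have : (i+1).toNat = i.toNat + 1 := by omega
      rw [this, ← List.drop_drop, hd]
      rfl
    rw [hget, ht]
    rw [ih (i+1) (by omega) ht]
    rfl

theorem pvSufFold_pvGo (picked : List String) (hlen : picked.length < 5) :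
    ∀ (xs : List String) (acc : PySem.Set String),
    pvSufFold (fun c suf a => pvGo suf (picked ++ [c]) a) xs acc = pvGo xs picked acc := by
  intro xs
  induction xs with
  | nil =>
    intro acc
    unfold pvGo
    rw [if_neg (by omega)]
    rfl
  | cons x t ih =>
    intro acc
    simp only [pvSufFold]
    rw [ih]
    conv_rhs => unfold pvGo
    rw [if_neg (by omega)]

theorem lvl5 (l : List String) (c1 c2 c3 c4 : String) (i : Int) (hi : 0 ≤ i)
    (acc : PySem.Set String) :
    List.foldl (fun acc m =>
        let char_5 := PySem.List.pyGetD l m ""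
        PySem.Set.add acc (PySem.Str.join "" [c1, c2, c3, c4, char_5])) acc
      (PySem.List.pyRange i (PySem.List.len l))
    = pvGo (List.drop i.toNat l) [c1, c2, c3, c4] acc := by
  rw [pvRange_foldl_suffix l
      (fun c _suf a => PySem.Set.add a (PySem.Str.join "" [c1, c2, c3, c4, c]))
      (List.drop i.toNat l) i hi rfl acc]
  rw [pvSufFold_congr _ (fun c suf a => pvGo suf ([c1, c2, c3, c4] ++ [c]) a)
      (by
        intro c suf a
        show PySem.Set.add a (PySem.Str.join "" [c1, c2, c3, c4, c])
          = pvGo suf [c1, c2, c3, c4, c] a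
        unfold pvGo
        rw [if_pos (by simp)])]
  exact pvSufFold_pvGo [c1, c2, c3, c4] (by simp) _ acc

theorem lvl4 (l : List String) (c1 c2 c3 : String) (i : Int) (hi : 0 ≤ i)
    (acc : PySem.Set String) :
    List.foldl (fun acc m =>
        let char_4 := PySem.List.pyGetD l m ""
        List.foldl (fun acc m2 =>
            let char_5 := PySem.List.pyGetD l m2 ""
            PySem.Set.add acc (PySem.Str.join "" [c1, c2, c3, char_4, char_5])) acc
          (PySem.List.pyRange (m+1) (PySem.List.len l))) acc
      (PySem.List.pyRange i (PySem.List.len l))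
    = pvGo (List.drop i.toNat l) [c1, c2, c3] acc := by
  rw [PySem.List.foldl_congr_mem _ _
      (fun acc m => pvGo (List.drop (m+1).toNat l) ([c1, c2, c3] ++ [PySem.List.pyGetD l m ""]) acc)
      acc (by
        intro a m hm
        have hm' : 0 ≤ m := by
          rcases (PySem.List.mem_pyRange_one).1 hm with ⟨h1, _⟩
          omega
        exact lvl5 l c1 c2 c3 (PySem.List.pyGetD l m "") (m+1) (by omega) a)]
  rw [pvRange_foldl_suffix l (fun c suf a => pvGo suf ([c1, c2, c3] ++ [c]) a)
      (List.drop i.toNat l) i hi rfl acc]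
  exact pvSufFold_pvGo [c1, c2, c3] (by simp) _ acc

theorem lvl3 (l : List String) (c1 c2 : String) (i : Int) (hi : 0 ≤ i)
    (acc : PySem.Set String) :
    List.foldl (fun acc m =>
        let char_3 := PySem.List.pyGetD l m ""
        List.foldl (fun acc m2 =>
            let char_4 := PySem.List.pyGetD l m2 ""
            List.foldl (fun acc m3 =>
                let char_5 := PySem.List.pyGetD l m3 ""
                PySem.Set.add acc (PySem.Str.join "" [c1, c2, char_3, char_4, char_5])) acc
              (PySem.List.pyRange (m2+1) (PySem.List.len l))) acc
          (PySem.List.pyRange (m+1) (PySem.List.len l))) acc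
      (PySem.List.pyRange i (PySem.List.len l))
    = pvGo (List.drop i.toNat l) [c1, c2] acc := by
  rw [PySem.List.foldl_congr_mem _ _
      (fun acc m => pvGo (List.drop (m+1).toNat l) ([c1, c2] ++ [PySem.List.pyGetD l m ""]) acc)
      acc (by
        intro a m hm
        have hm' : 0 ≤ m := by
          rcases (PySem.List.mem_pyRange_one).1 hm with ⟨h1, _⟩
          omega
        exact lvl4 l c1 c2 (PySem.List.pyGetD l m "") (m+1) (by omega) a)]
  rw [pvRange_foldl_suffix l (fun c suf a => pvGo suf ([c1, c2] ++ [c]) a)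
      (List.drop i.toNat l) i hi rfl acc]
  exact pvSufFold_pvGo [c1, c2] (by simp) _ acc

theorem lvl2 (l : List String) (c1 : String) (i : Int) (hi : 0 ≤ i)
    (acc : PySem.Set String) :
    List.foldl (fun acc m =>
        let char_2 := PySem.List.pyGetD l m ""
        List.foldl (fun acc m2 =>
            let char_3 := PySem.List.pyGetD l m2 ""
            List.foldl (fun acc m3 =>
                let char_4 := PySem.List.pyGetD l m3 ""
                List.foldl (fun acc m4 =>
                    let char_5 := PySem.List.pyGetD l m4 ""
                    PySem.Set.add acc (PySem.Str.join "" [c1, char_2, char_3, char_4, char_5])) acc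
                  (PySem.List.pyRange (m3+1) (PySem.List.len l))) acc
              (PySem.List.pyRange (m2+1) (PySem.List.len l))) acc
          (PySem.List.pyRange (m+1) (PySem.List.len l))) acc
      (PySem.List.pyRange i (PySem.List.len l))
    = pvGo (List.drop i.toNat l) [c1] acc := by
  rw [PySem.List.foldl_congr_mem _ _
      (fun acc m => pvGo (List.drop (m+1).toNat l) ([c1] ++ [PySem.List.pyGetD l m ""]) acc)
      acc (by
        intro a m hm
        have hm' : 0 ≤ m := by
          rcases (PySem.List.mem_pyRange_one).1 hm with ⟨h1, _⟩
          omega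
        exact lvl3 l c1 (PySem.List.pyGetD l m "") (m+1) (by omega) a)]
  rw [pvRange_foldl_suffix l (fun c suf a => pvGo suf ([c1] ++ [c]) a)
      (List.drop i.toNat l) i hi rfl acc]
  exact pvSufFold_pvGo [c1] (by simp) _ acc

theorem lvl1 (l : List String) (i : Int) (hi : 0 ≤ i) (acc : PySem.Set String) :
    List.foldl (fun acc m =>
        let char_1 := PySem.List.pyGetD l m ""
        List.foldl (fun acc m2 =>
            let char_2 := PySem.List.pyGetD l m2 ""
            List.foldl (fun acc m3 =>
                let char_3 := PySem.List.pyGetD l m3 ""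
                List.foldl (fun acc m4 =>
                    let char_4 := PySem.List.pyGetD l m4 ""
                    List.foldl (fun acc m5 =>
                        let char_5 := PySem.List.pyGetD l m5 ""
                        PySem.Set.add acc (PySem.Str.join "" [char_1, char_2, char_3, char_4, char_5])) acc
                      (PySem.List.pyRange (m4+1) (PySem.List.len l))) acc
                  (PySem.List.pyRange (m3+1) (PySem.List.len l))) acc
              (PySem.List.pyRange (m2+1) (PySem.List.len l))) acc
          (PySem.List.pyRange (m+1) (PySem.List.len l))) acc
      (PySem.List.pyRange i (PySem.List.len l))
    = pvGo (List.drop i.toNat l) [] acc := by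
  rw [PySem.List.foldl_congr_mem _ _
      (fun acc m => pvGo (List.drop (m+1).toNat l) ([] ++ [PySem.List.pyGetD l m ""]) acc)
      acc (by
        intro a m hm
        have hm' : 0 ≤ m := by
          rcases (PySem.List.mem_pyRange_one).1 hm with ⟨h1, _⟩
          omega
        exact lvl2 l (PySem.List.pyGetD l m "") (m+1) (by omega) a)]
  rw [pvRange_foldl_suffix l (fun c suf a => pvGo suf ([] ++ [c]) a)
      (List.drop i.toNat l) i hi rfl acc]
  exact pvSufFold_pvGo [] (by simp) _ acc

-- ===== VERDICT (by name: the statement is the Claim_ definition above) =====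
theorem get_5_char_combination_set_spec : Claim_equal_get_5_char_combination_set := by
  intro l _hdom
  unfold Spec_get_5_char_combination_set get_5_char_combination_set get_5_char_combination_set_alt
  rw [pvChoose_eq_pvGo]
  have := lvl1 l 0 (by omega) PySem.Set.empty
  simpa using this
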